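-- pv_equiv track=rewrite | github.com/921-Beltechi-Lois/Fundamentals-of-Programming | A02/program.py | get_modulus_list
-- ===== SOURCE A (Python) =====
-- import math
--
-- def get_real_part(complex_number):
--     return complex_number['real']
--
-- def get_img_part(complex_number):
--     return complex_number['imaginary']
--
-- def check_modulus(complex_number):
--     """
--
--     :param complex_number: Given complex number
--     :return: TRUE = value of the modulus complex number is in the range [0,10], otherwise FALSE
--     """
--     real = get_real_part(complex_number)
--     img = get_img_part(complex_number)
--     value = math.sqrt(real * real + img * img)
--     if value >= 0 and value <= 10:
--         return 1  # modulus good to go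
--     return 0
--
-- def get_modulus_list(complex_number_list):
--     """
--     :param complex_number_list: All complex number list
--     :return: Returns the LIST of modulus numbers found in longest sequence (list called "result"), if no match -> then the list is empty
--     """
--     first = -1
--     dim = -1
--     max_dim = -1
--     p1 = -1
--     p2 = -1
--     length = int(len(complex_number_list))
--     for i in range(length):
--         if check_modulus(complex_number_list[i]):  # true
--             if first == -1:
--                 first = i
--                 dim = 1
--             else:
--                 dim = dim + 1
--         else:
--             if dim > max_dim:
--                 max_dim = dim
--                 p1 = first
--             first = -1
--             dim = -1
--     if dim > max_dim:
--         max_dim = dim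
--         p1 = first
--     if max_dim != -1:
--         p2 = p1 + max_dim - 1
--         result = []
--         for i in range(p1, p2 + 1):
--             result.append(complex_number_list[i])
--         return result
--         # return complex_number_list[p1:p2]
--     return []
-- ===== SOURCE B (Python) =====
-- import math
--
-- def get_real_part(complex_number):
--     return complex_number['real']
--
-- def get_img_part(complex_number):
--     return complex_number['imaginary']
--
-- def check_modulus(complex_number):
--     real = get_real_part(complex_number)
--     img = get_img_part(complex_number)
--     value = math.sqrt(real * real + img * img)
--     return 1 if 0 <= value <= 10 else 0
--
-- def get_modulus_list(complex_number_list):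
--     """Two-phase run segmentation: jump over each maximal run of qualifying
--     elements as a block (slice), keep the first strictly-longest run."""
--     n = len(complex_number_list)
--     best = []
--     i = 0
--     while i < n:
--         if check_modulus(complex_number_list[i]):
--             j = i + 1
--             while j < n and check_modulus(complex_number_list[j]):
--                 j += 1
--             run = complex_number_list[i:j]
--             if len(best) < len(run):
--                 best = run
--             i = j
--         else:
--             i += 1
--     return best
-- ===== Notes on version B (the rewrite author's own statement) =====
-- stated objective: alternative
-- what changed: Replaces A's single-pass index bookkeeping (first/dim/max_dim/p1 sentinels plus a second extraction loop over indices) by a two-phase run segmentation: jump over each maximal run of qualifying elements as a slice and keep the first strictly-longest run as a list, so no index state or extraction pass remains.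
import Mathlib
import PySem

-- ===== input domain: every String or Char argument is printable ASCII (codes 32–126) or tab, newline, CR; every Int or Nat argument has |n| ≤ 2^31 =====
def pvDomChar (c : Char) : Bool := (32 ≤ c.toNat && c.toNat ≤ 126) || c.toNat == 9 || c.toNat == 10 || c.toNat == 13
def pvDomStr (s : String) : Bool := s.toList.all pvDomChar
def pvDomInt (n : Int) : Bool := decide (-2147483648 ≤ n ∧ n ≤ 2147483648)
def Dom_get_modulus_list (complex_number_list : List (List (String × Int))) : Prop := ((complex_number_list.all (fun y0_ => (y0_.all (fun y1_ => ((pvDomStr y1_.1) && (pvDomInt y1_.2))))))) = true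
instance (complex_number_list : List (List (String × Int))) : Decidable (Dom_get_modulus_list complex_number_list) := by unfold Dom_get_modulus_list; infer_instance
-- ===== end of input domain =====

-- B restructures A's single-pass index bookkeeping into a two-phase run segmentation
-- (maximal runs of qualifying elements, keep the first strictly-longest run); same values on Pre_.

-- ===== PORT A =====
-- Helpers shared by both Pythons (Source B defines them identically).
-- c['real'] / c['imaginary'] raise KeyError on a missing key; Pre_ guarantees the key is
-- present, so the first-match lookup's default 0 is never taken.
def get_real_part (complex_number : List (String × Int)) : Int :=
  (List.lookup "real" complex_number).getD 0

def get_img_part (complex_number : List (String × Int)) : Int :=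
  (List.lookup "imaginary" complex_number).getD 0

-- math.sqrt(real*real+img*img) ∈ [0,10] ⟺ real*real+img*img ≤ 100: exact for integer
-- operands (sqrt is nonnegative, monotone and correctly rounded; 10.0 and 100.0 are exact floats).
def check_modulus (complex_number : List (String × Int)) : Int :=
  let real := get_real_part complex_number
  let img := get_img_part complex_number
  if real * real + img * img ≤ 100 then 1 else 0

-- Python truthiness of check_modulus's result (an int): nonzero = true.
def modOk (complex_number : List (String × Int)) : Bool :=
  check_modulus complex_number != 0

-- A's for-loop over range(len), state (first, dim, max_dim, p1); i is the loop index.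
def aLoop : List (List (String × Int)) → Int → Int × Int × Int × Int → Int × Int × Int × Int
  | [], _, st => st
  | x :: rest, i, (first, dim, max_dim, p1) =>
    if modOk x then
      if first = -1 then aLoop rest (i + 1) (i, 1, max_dim, p1)
      else aLoop rest (i + 1) (first, dim + 1, max_dim, p1)
    else
      if dim > max_dim then aLoop rest (i + 1) (-1, -1, dim, first)
      else aLoop rest (i + 1) (-1, -1, max_dim, p1)

def get_modulus_list (complex_number_list : List (List (String × Int))) : List (List (String × Int)) :=
  let st := aLoop complex_number_list 0 (-1, -1, -1, -1)
  let first := st.1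
  let dim := st.2.1
  let max_dim := if dim > st.2.2.1 then dim else st.2.2.1
  let p1 := if dim > st.2.2.1 then first else st.2.2.2
  if max_dim ≠ -1 then
    let p2 := p1 + max_dim - 1
    (PySem.List.pyRange p1 (p2 + 1) 1).foldl
      (fun acc i => acc ++ [PySem.List.pyGetD complex_number_list i []]) []
  else []

-- ===== PORT B =====
-- Source B: outer while over i; on a qualifying element scan the run to j, slice it out, keep
-- the first strictly-longest run.  Realised as recursion on the remaining suffix.
def altGo : List (List (String × Int)) → List (List (String × Int)) → List (List (String × Int))
  | [], best => best
  | x :: rest, best =>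
    if modOk x then
      let run := x :: rest.takeWhile modOk
      let rest' := rest.dropWhile modOk
      altGo rest' (if best.length < run.length then run else best)
    else altGo rest best
termination_by xs _ => xs.length
decreasing_by
  · exact Nat.lt_succ_of_le (List.length_dropWhile_le modOk rest)
  · exact Nat.lt_succ_self rest.length

def get_modulus_list_alt (complex_number_list : List (List (String × Int))) : List (List (String × Int)) :=
  altGo complex_number_list []

-- ===== PRECONDITION & SPEC =====
-- Pre_ excludes exactly the inputs on which A raises KeyError: an element dict missing
-- the key 'real' or 'imaginary'.
def Pre_get_modulus_list (complex_number_list : List (List (String × Int))) : Prop :=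
  ∀ c ∈ complex_number_list,
    (List.lookup "real" c).isSome = true ∧ (List.lookup "imaginary" c).isSome = true
instance (complex_number_list : List (List (String × Int))) : Decidable (Pre_get_modulus_list complex_number_list) := by unfold Pre_get_modulus_list; infer_instance

def pvWitness_get_modulus_list : (List (List (String × Int))) :=
  [[("real", 3), ("imaginary", 4)], [("real", 100), ("imaginary", 0)], [("real", 0), ("imaginary", 1)]]

def Spec_get_modulus_list (complex_number_list : List (List (String × Int))) (out : List (List (String × Int))) : Prop := out = get_modulus_list_alt complex_number_list
instance (complex_number_list : List (List (String × Int))) (out : List (List (String × Int))) : Decidable (Spec_get_modulus_list complex_number_list out) := by unfold Spec_get_modulus_list; infer_instance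

-- ===== CLAIM (what is proved, stated in full; the proofs are below) =====
def Claim_equal_get_modulus_list : Prop := ∀ (complex_number_list : List (List (String × Int))), Dom_get_modulus_list complex_number_list → Pre_get_modulus_list complex_number_list → Spec_get_modulus_list complex_number_list (get_modulus_list complex_number_list)

-- ===== LEMMAS AND PROOFS =====

-- Element-wise reference: current run `cur` and best-so-far `best` as lists.
def goRef : List (List (String × Int)) → List (List (String × Int)) → List (List (String × Int)) → List (List (String × Int))
  | [], cur, best => if best.length < cur.length then cur else best
  | x :: r, cur, best =>
    if modOk x then goRef r (cur ++ [x]) best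
    else goRef r [] (if best.length < cur.length then cur else best)

-- The tail of port A (best-run update after the loop + extraction by indices).
def finishA (xs : List (List (String × Int))) (st : Int × Int × Int × Int) : List (List (String × Int)) :=
  let first := st.1
  let dim := st.2.1
  let max_dim := if dim > st.2.2.1 then dim else st.2.2.1
  let p1 := if dim > st.2.2.1 then first else st.2.2.2
  if max_dim ≠ -1 then
    let p2 := p1 + max_dim - 1
    (PySem.List.pyRange p1 (p2 + 1) 1).foldl
      (fun acc i => acc ++ [PySem.List.pyGetD xs i []]) []
  else []

lemma get_eq_finish (xs : List (List (String × Int))) :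
    get_modulus_list xs = finishA xs (aLoop xs 0 (-1, -1, -1, -1)) := rfl

lemma map_get_range (xs : List (List (String × Int))) :
    ∀ (len q : Nat), q + len ≤ xs.length →
      (List.range len).map (fun (k : Nat) => PySem.List.pyGetD xs ((q : Int) + (k : Int)) []) =
        (xs.drop q).take len := by
  intro len
  induction len with
  | zero => intro q _; simp
  | succ m ih =>
    intro q h
    rw [List.range_succ, List.map_append, ih q (by omega), List.take_add_one]
    have hq : q + m < xs.length := by omega
    have hget : ((xs.drop q)[m]?).toList = [xs[q + m]] := by
      have hm : m < (xs.drop q).length := by simp; omega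
      rw [List.getElem?_eq_getElem hm]
      simp [List.getElem_drop]
    rw [hget]
    have : PySem.List.pyGetD xs ((q : Int) + (m : Int)) [] = xs[q + m] := by
      rw [show ((q : Int) + (m : Int)) = ((q + m : Nat) : Int) by push_cast; ring,
        PySem.List.pyGetD_natCast, List.getD_eq_getElem _ _ hq]
    simp [this]

lemma extract_eq (xs : List (List (String × Int))) (q len : Nat) (h : q + len ≤ xs.length) :
    (PySem.List.pyRange (q : Int) ((q : Int) + (len : Int)) 1).foldl
        (fun acc i => acc ++ [PySem.List.pyGetD xs i []]) [] =
      (xs.drop q).take len := by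
  rw [PySem.List.foldl_append_singleton_eq_map (fun i => PySem.List.pyGetD xs i []),
    PySem.List.pyRange_one, List.map_map]
  have hcut : ((q : Int) + (len : Int) - (q : Int)).toNat = len := by omega
  rw [hcut, List.nil_append, ← map_get_range xs len q h]
  simp [Function.comp]

lemma aLoop_eq_go (xs : List (List (String × Int))) :
    ∀ (rest cur best : List (List (String × Int))) (n : Nat) (first dim max_dim p1 : Int),
      ((cur = [] ∧ first = -1 ∧ dim = -1) ∨
        (cur ≠ [] ∧ dim = (cur.length : Int) ∧ first = (n : Int) - (cur.length : Int))) →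
      ((best = [] ∧ max_dim = -1 ∧ p1 = -1) ∨
        (best ≠ [] ∧ max_dim = (best.length : Int) ∧
          ∃ q : Nat, p1 = (q : Int) ∧ (xs.drop q).take best.length = best ∧
            q + best.length ≤ xs.length)) →
      xs.drop (n - cur.length) = cur ++ rest → cur.length ≤ n →
      finishA xs (aLoop rest (n : Int) (first, dim, max_dim, p1)) = goRef rest cur best := by
  intro rest
  induction rest with
  | nil =>
    intro cur best n first dim max_dim p1 hc hb h hlen
    rcases hc with ⟨hc0, hf, hd⟩ | ⟨hcne, hd, hf⟩ <;>
      rcases hb with ⟨hb0, hm, hp⟩ | ⟨hbne, hm, q, hp, hbq, hble⟩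
    · subst hc0 hf hd hb0 hm hp
      simp [aLoop, finishA, goRef]
    · -- cur = [], best ≠ []
      subst hc0 hf hd hm hp
      have hbl : 1 ≤ best.length := List.length_pos_iff.mpr hbne
      rw [aLoop, goRef]
      simp only [finishA]
      rw [if_neg (by omega : ¬ ((-1 : Int) > (best.length : Int))),
        if_neg (by omega : ¬ ((-1 : Int) > (best.length : Int)))]
      rw [if_pos (by omega : ¬ ((best.length : Int) = -1))]
      rw [show ((q : Int) + (best.length : Int) - 1 + 1) = (q : Int) + (best.length : Int) by ring,
        extract_eq xs q best.length hble, hbq]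
      simp
    · -- cur ≠ [], best = []
      subst hb0 hm hp hd hf
      have hcl : 1 ≤ cur.length := List.length_pos_iff.mpr hcne
      have hq : ((n : Int) - (cur.length : Int)) = ((n - cur.length : Nat) : Int) := by omega
      have hdrop : xs.drop (n - cur.length) = cur := by simpa using h
      have hlendrop : xs.length - (n - cur.length) = cur.length := by
        have := congrArg List.length hdrop; simpa using this
      have hle2 : (n - cur.length) + cur.length ≤ xs.length := by omega
      rw [aLoop, goRef]
      simp only [finishA]
      rw [if_pos (by omega : ((cur.length : Int) > (-1 : Int))),
        if_pos (by omega : ((cur.length : Int) > (-1 : Int)))]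
      rw [if_pos (by omega : ¬ ((cur.length : Int) = -1))]
      rw [show ((n : Int) - (cur.length : Int) + (cur.length : Int) - 1 + 1)
          = ((n - cur.length : Nat) : Int) + (cur.length : Int) by omega,
        hq, extract_eq xs (n - cur.length) cur.length hle2, hdrop, List.take_length]
      simp
    · -- cur ≠ [], best ≠ []
      subst hd hf hm hp
      have hcl : 1 ≤ cur.length := List.length_pos_iff.mpr hcne
      have hq : ((n : Int) - (cur.length : Int)) = ((n - cur.length : Nat) : Int) := by omega
      have hdrop : xs.drop (n - cur.length) = cur := by simpa using h
      have hlendrop : xs.length - (n - cur.length) = cur.length := by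
        have := congrArg List.length hdrop; simpa using this
      have hle2 : (n - cur.length) + cur.length ≤ xs.length := by omega
      rw [aLoop, goRef]
      simp only [finishA]
      by_cases hcmp : best.length < cur.length
      · rw [if_pos (by omega : ((cur.length : Int) > (best.length : Int))),
          if_pos (by omega : ((cur.length : Int) > (best.length : Int)))]
        rw [if_pos (by omega : ¬ ((cur.length : Int) = -1))]
        rw [show ((n : Int) - (cur.length : Int) + (cur.length : Int) - 1 + 1)
            = ((n - cur.length : Nat) : Int) + (cur.length : Int) by omega,
          hq, extract_eq xs (n - cur.length) cur.length hle2, hdrop, List.take_length]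
        simp [hcmp]
      · rw [if_neg (by omega : ¬ ((cur.length : Int) > (best.length : Int))),
          if_neg (by omega : ¬ ((cur.length : Int) > (best.length : Int)))]
        rw [if_pos (by omega : ¬ ((best.length : Int) = -1))]
        rw [show ((q : Int) + (best.length : Int) - 1 + 1) = (q : Int) + (best.length : Int) by ring,
          extract_eq xs q best.length hble, hbq]
        simp [hcmp]
  | cons x rest' ih =>
    intro cur best n first dim max_dim p1 hc hb h hlen
    have hdn : xs.drop n = x :: rest' := by
      have h2 : xs.drop n = (xs.drop (n - cur.length)).drop cur.length := by
        rw [List.drop_drop]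
        congr 1
        omega
      rw [h2, h, List.drop_left]
    have hd1 : xs.drop (n + 1) = rest' := by
      have h3 : (xs.drop n).drop 1 = rest' := by rw [hdn]; simp
      rw [List.drop_drop] at h3
      exact h3
    have hcast : ((n : Int) + 1) = ((n + 1 : Nat) : Int) := by push_cast; ring
    by_cases hx : modOk x = true
    · rw [goRef, if_pos hx]
      rcases hc with ⟨hc0, hf, hd⟩ | ⟨hcne, hd, hf⟩
      · subst hc0 hf hd
        rw [aLoop, if_pos hx, if_pos rfl, hcast]
        exact ih [x] best (n + 1) _ _ _ _
          (Or.inr ⟨by simp, by simp,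
            by simp only [List.length_singleton]; push_cast; ring⟩) hb
          (by simpa using hdn) (by simp)
      · have hfne : ¬ (first = -1) := by
          rw [hf]; omega
        subst hd hf
        rw [aLoop, if_pos hx, if_neg hfne, hcast]
        have harg : xs.drop ((n + 1) - (cur ++ [x]).length) = (cur ++ [x]) ++ (x :: rest').tail := by
          have : (n + 1) - (cur ++ [x]).length = n - cur.length := by simp
          rw [this, h]
          simp
        exact ih (cur ++ [x]) best (n + 1) _ _ _ _
          (Or.inr ⟨by simp, by simp only [List.length_append, List.length_singleton]; push_cast; try ring,
            by simp only [List.length_append, List.length_singleton]; push_cast; try ring⟩) hb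
          (by simpa using harg) (by simp only [List.length_append, List.length_singleton]; omega)
    · rw [goRef, if_neg hx]
      have hbmax : max_dim = -1 ∨ ∃ m : Nat, max_dim = (m : Int) := by
        rcases hb with ⟨_, hm, _⟩ | ⟨_, hm, _⟩
        · exact Or.inl hm
        · exact Or.inr ⟨best.length, hm⟩
      rcases hc with ⟨hc0, hf, hd⟩ | ⟨hcne, hd, hf⟩
      · subst hc0 hf hd
        have hnot : ¬ ((-1 : Int) > max_dim) := by
          rcases hbmax with hm | ⟨m, hm⟩ <;> subst hm <;> omega
        rw [aLoop, if_neg hx, if_neg hnot, hcast]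
        have hbest : (if best.length < ([] : List (List (String × Int))).length then [] else best) = best := by
          simp
        rw [hbest]
        exact ih [] best (n + 1) _ _ _ _ (Or.inl ⟨rfl, rfl, rfl⟩) hb (by simpa using hd1)
          (by simp)
      · subst hd hf
        have hcl : 1 ≤ cur.length := List.length_pos_iff.mpr hcne
        have hdropc : xs.drop (n - cur.length) = cur ++ x :: rest' := h
        have hlendrop : xs.length - (n - cur.length) = cur.length + (rest'.length + 1) := by
          have := congrArg List.length hdropc; simp at this; omega
        by_cases hcmp : best.length < cur.length
        · have hgt : ((cur.length : Int) > max_dim) := by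
            rcases hb with ⟨hb0, hm, _⟩ | ⟨_, hm, _⟩ <;> subst hm <;> omega
          rw [aLoop, if_neg hx, if_pos hgt, hcast, if_pos hcmp]
          refine ih [] cur (n + 1) _ _ _ _ (Or.inl ⟨rfl, rfl, rfl⟩)
            (Or.inr ⟨hcne, rfl, n - cur.length, by omega, ?_, by omega⟩)
            (by simpa using hd1) (by simp)
          rw [hdropc]
          exact List.take_left
        · have hble2 : best ≠ [] := by
            intro hb0
            subst hb0
            simp only [List.length_nil, Nat.not_lt, Nat.le_zero] at hcmp
            exact hcne (List.eq_nil_of_length_eq_zero hcmp)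
          have hngt : ¬ ((cur.length : Int) > max_dim) := by
            rcases hb with ⟨hb0, hm, _⟩ | ⟨_, hm, _⟩
            · exact absurd hb0 hble2
            · subst hm; omega
          rw [aLoop, if_neg hx, if_neg hngt, hcast, if_neg hcmp]
          exact ih [] best (n + 1) _ _ _ _ (Or.inl ⟨rfl, rfl, rfl⟩) hb
            (by simpa using hd1) (by simp)

lemma goRef_run : ∀ (run t cur best : List (List (String × Int))),
    (∀ z ∈ run, modOk z = true) →
    goRef (run ++ t) cur best = goRef t (cur ++ run) best := by
  intro run
  induction run with
  | nil => intro t cur best _; simp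
  | cons z r ih =>
    intro t cur best h
    have hz : modOk z = true := h z (by simp)
    simp only [List.cons_append, goRef, hz, if_pos]
    rw [ih t (cur ++ [z]) best (fun w hw => h w (by simp [hw]))]
    simp

lemma alt_eq_go : ∀ (n : Nat) (xs best : List (List (String × Int))), xs.length ≤ n →
    altGo xs best = goRef xs [] best := by
  intro n
  induction n with
  | zero =>
    intro xs best h
    have : xs = [] := List.eq_nil_of_length_eq_zero (Nat.le_zero.mp h)
    subst this; simp [altGo, goRef]
  | succ n ih =>
    intro xs best h
    match xs with
    | [] => simp [altGo, goRef]
    | x :: rest =>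
      by_cases hx : modOk x = true
      · rw [altGo, if_pos hx]
        have hsplit : rest.takeWhile modOk ++ rest.dropWhile modOk = rest :=
          List.takeWhile_append_dropWhile
        have hrun : ∀ z ∈ x :: rest.takeWhile modOk, modOk z = true := by
          intro z hz
          rcases List.mem_cons.mp hz with h1 | h1
          · subst h1; exact hx
          · exact List.mem_takeWhile_imp h1
        have hgo : goRef (x :: rest) [] best
            = goRef (rest.dropWhile modOk) (x :: rest.takeWhile modOk) best := by
          conv_lhs => rw [← hsplit]
          rw [show (x :: (rest.takeWhile modOk ++ rest.dropWhile modOk))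
              = (x :: rest.takeWhile modOk) ++ rest.dropWhile modOk by simp,
            goRef_run _ _ _ _ hrun]
          simp
        rw [hgo]
        set run := x :: rest.takeWhile modOk with hrundef
        set best' := if best.length < run.length then run else best with hb'
        have hlen : rest.length ≤ n := Nat.lt_succ_iff.mp (by simpa using h)
        match hrest : rest.dropWhile modOk with
        | [] => simp [altGo, goRef]
        | y :: t =>
          have hy : modOk y = false := by
            have hne : rest.dropWhile modOk ≠ [] := by simp [hrest]
            have := List.head_dropWhile_not modOk (l := rest) hne
            simpa [hrest] using this
          have ht : t.length ≤ n := by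
            have h1 : (rest.dropWhile modOk).length ≤ rest.length :=
              List.length_dropWhile_le modOk rest
            rw [hrest] at h1
            simp at h1
            omega
          have h1 : altGo (y :: t) best' = altGo t best' := by
            rw [altGo, if_neg (by simp [hy])]
          have h2 : goRef (y :: t) run best
              = goRef t [] (if best.length < run.length then run else best) := by
            rw [goRef, if_neg (by simp [hy])]
          rw [h1, h2, ← hb', ih t best' ht]
      · rw [altGo, if_neg hx, goRef, if_neg hx]
        have : (if best.length < ([] : List (List (String × Int))).length then [] else best) = best := by simp
        rw [this, ih rest best (Nat.lt_succ_iff.mp (by simpa using h))]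

-- ===== VERDICT (by name: the statement is the Claim_ definition above) =====
theorem get_modulus_list_spec : Claim_equal_get_modulus_list := by
  intro xs _ _
  show get_modulus_list xs = get_modulus_list_alt xs
  rw [get_eq_finish, get_modulus_list_alt, alt_eq_go xs.length xs [] le_rfl]
  exact aLoop_eq_go xs xs [] [] 0 (-1) (-1) (-1) (-1)
    (Or.inl ⟨rfl, rfl, rfl⟩) (Or.inl ⟨rfl, rfl, rfl⟩) (by simp) (by simp)
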